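-- pv_equiv track=rewrite | github.com/anthonykish/EECE590X | libs/fsm/state_table_timing_tools.py | _state_trace_to_bus_wave
-- ===== SOURCE A (Python) =====
-- from typing import Dict, Iterable, List, Tuple, Optional, Any
--
-- def _state_trace_to_bus_wave(state_trace: List[str]) -> Tuple[str, List[str]]:
--     """
--     Convert a symbolic state trace like:
--         ["S0", "S0", "S1", "S1", "S0"]
--     into WaveDrom bus representation:
--         wave="=.=.="
--         data=["S0", "S1", "S0"]
--     """
--     if not state_trace:
--         return "", []
--
--     wave = "="
--     data = [state_trace[0]]
--
--     for i in range(1, len(state_trace)):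
--         if state_trace[i] == state_trace[i - 1]:
--             wave += "."
--         else:
--             wave += "="
--             data.append(state_trace[i])
--
--     return wave, data
-- ===== SOURCE B (Python) =====
-- from typing import List, Tuple
--
--
-- def _state_trace_to_bus_wave(state_trace: List[str]) -> Tuple[str, List[str]]:
--     # Split the trace into maximal runs of equal states, then render each run
--     # as "=" followed by (length-1) dots; data is the run keys.
--     runs = []
--     i = 0
--     n = len(state_trace)
--     while i < n:
--         x = state_trace[i]
--         j = i + 1
--         while j < n and state_trace[j] == x:
--             j += 1
--         runs.append((x, j - i))
--         i = j
--     wave = "".join("=" + "." * (ln - 1) for _, ln in runs)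
--     data = [x for x, _ in runs]
--     return wave, data
-- ===== Notes on version B (the rewrite author's own statement) =====
-- stated objective: alternative
-- what changed: Replaces the index-based adjacent-element comparison loop with a run-length encoding pass that splits the trace into maximal runs and renders each run as '=' plus dots, joining the pieces.
import Mathlib
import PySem

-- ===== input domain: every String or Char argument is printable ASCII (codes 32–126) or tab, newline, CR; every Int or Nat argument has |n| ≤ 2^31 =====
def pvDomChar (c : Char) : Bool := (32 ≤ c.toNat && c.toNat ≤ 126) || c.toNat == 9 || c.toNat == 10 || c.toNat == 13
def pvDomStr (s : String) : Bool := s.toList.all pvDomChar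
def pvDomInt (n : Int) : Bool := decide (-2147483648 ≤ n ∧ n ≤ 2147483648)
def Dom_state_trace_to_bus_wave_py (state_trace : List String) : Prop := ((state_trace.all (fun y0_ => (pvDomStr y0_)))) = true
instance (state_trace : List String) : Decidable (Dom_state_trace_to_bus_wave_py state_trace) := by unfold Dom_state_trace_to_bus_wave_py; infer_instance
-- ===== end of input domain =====

-- B replaces A's index-based adjacent-comparison loop with a run-length-encoding pass (maximal runs of equal states, each rendered as "=" plus dots); alternative decomposition, same cost.


-- ===== PORT A =====
def state_trace_to_bus_wave_py (state_trace : List String) : String × List String :=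
  if state_trace = [] then ("", [])
  else
    let init : List Char × List String := (['='], [PySem.List.pyGetD state_trace 0 ""])
    let res := (PySem.List.pyRange 1 (state_trace.length : Int) 1).foldl
      (fun (st : List Char × List String) i =>
        if PySem.List.pyGetD state_trace i "" = PySem.List.pyGetD state_trace (i - 1) "" then
          (st.1 ++ ['.'], st.2)
        else
          (st.1 ++ ['='], st.2 ++ [PySem.List.pyGetD state_trace i ""])) init
    (String.ofList res.1, res.2)

-- ===== PORT B =====
-- split into maximal runs (key, length), left to right — B's inner while = takeWhile/dropWhile
def pvRuns : List String → List (String × Nat)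
  | [] => []
  | x :: xs =>
    (x, (xs.takeWhile (· == x)).length + 1) :: pvRuns (xs.dropWhile (· == x))
  termination_by l => l.length
  decreasing_by simpa using Nat.lt_succ_of_le (List.length_dropWhile_le _ _)

def state_trace_to_bus_wave_py_alt (state_trace : List String) : String × List String :=
  let runs := pvRuns state_trace
  (String.ofList (runs.flatMap (fun p => '=' :: List.replicate (p.2 - 1) '.')),
   runs.map Prod.fst)

-- ===== PRECONDITION & SPEC =====
def Spec_state_trace_to_bus_wave_py (state_trace : List String) (out : String × List String) : Prop := out = state_trace_to_bus_wave_py_alt state_trace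
instance (state_trace : List String) (out : String × List String) : Decidable (Spec_state_trace_to_bus_wave_py state_trace out) := by unfold Spec_state_trace_to_bus_wave_py; infer_instance

-- ===== CLAIM (what is proved, stated in full; the proofs are below) =====
def Claim_equal_state_trace_to_bus_wave_py : Prop := ∀ (state_trace : List String), Dom_state_trace_to_bus_wave_py state_trace → Spec_state_trace_to_bus_wave_py state_trace (state_trace_to_bus_wave_py state_trace)


-- ===== LEMMAS AND PROOFS =====

-- A's loop, rephrased as forward recursion on the tail with the previous state carried along
def pvG : String → List String → List Char × List String
  | _, [] => ([], [])
  | prev, y :: t =>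
    if y = prev then ('.' :: (pvG y t).1, (pvG y t).2)
    else ('=' :: (pvG y t).1, y :: (pvG y t).2)

lemma pv_fold (xs : List String) : ∀ (x : String) (w : List Char) (d : List String),
    List.foldl (fun (st : List Char × List String) (k : Nat) =>
      if (x :: xs).getD (k + 1) "" = (x :: xs).getD k "" then (st.1 ++ ['.'], st.2)
      else (st.1 ++ ['='], st.2 ++ [(x :: xs).getD (k + 1) ""])) (w, d) (List.range xs.length)
    = (w ++ (pvG x xs).1, d ++ (pvG x xs).2) := by
  induction xs with
  | nil => intro x w d; simp [pvG]
  | cons y t ih =>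
    intro x w d
    rw [List.length_cons, List.range_succ_eq_map, List.foldl_cons, List.foldl_map]
    simp only [List.getD_cons_succ, List.getD_cons_zero]
    by_cases h : y = x
    · subst h
      rw [if_pos rfl]
      have h2 := ih y (w ++ ['.']) d
      simp only [List.getD_cons_succ] at h2
      rw [h2]
      simp [pvG]
    · rw [if_neg h]
      have h2 := ih y (w ++ ['=']) (d ++ [y])
      simp only [List.getD_cons_succ] at h2
      rw [h2]
      simp [pvG, h]

lemma pv_g_runs : ∀ (t : List String) (prev : String),
    '=' :: (pvG prev t).1
      = (pvRuns (prev :: t)).flatMap (fun p => '=' :: List.replicate (p.2 - 1) '.')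
    ∧ prev :: (pvG prev t).2 = (pvRuns (prev :: t)).map Prod.fst := by
  intro t
  induction t with
  | nil => intro prev; simp [pvG, pvRuns]
  | cons y t ih =>
    intro prev
    by_cases h : y = prev
    · subst h
      obtain ⟨ihw, ihd⟩ := ih y
      rw [pvRuns] at ihw ihd
      constructor
      · have hw : (pvG y t).1
            = List.replicate (t.takeWhile (· == y)).length '.'
              ++ (pvRuns (t.dropWhile (· == y))).flatMap (fun p => '=' :: List.replicate (p.2 - 1) '.') := by
          simp only [List.flatMap_cons, Nat.add_sub_cancel, List.cons_append,
            List.cons.injEq] at ihw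
          exact ihw.2
        simp [pvRuns, pvG, hw, List.replicate_succ]
      · have hd : (pvG y t).2 = (pvRuns (t.dropWhile (· == y))).map Prod.fst := by
          simp only [List.map_cons, List.cons.injEq] at ihd
          exact ihd.2
        simp [pvRuns, pvG, hd]
    · obtain ⟨ihw, ihd⟩ := ih y
      have hb : (y == prev) = false := by simp [h]
      rw [pvRuns, List.takeWhile_cons, List.dropWhile_cons]
      simp only [hb, Bool.false_eq_true, ite_false]
      constructor
      · simp only [pvG, if_neg h, List.flatMap_cons, List.length_nil,
          Nat.add_sub_cancel, List.replicate_zero, List.cons_append, List.nil_append, ihw]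
      · simp only [pvG, if_neg h, List.map_cons, ihd]

-- ===== VERDICT (by name: the statement is the Claim_ definition above) =====
theorem state_trace_to_bus_wave_py_spec : Claim_equal_state_trace_to_bus_wave_py := by
  intro trace _
  unfold Spec_state_trace_to_bus_wave_py
  cases trace with
  | nil => simp [state_trace_to_bus_wave_py, state_trace_to_bus_wave_py_alt, pvRuns]
  | cons x xs =>
    unfold state_trace_to_bus_wave_py state_trace_to_bus_wave_py_alt
    have hr : PySem.List.pyRange 1 (((x :: xs).length : Int)) 1
        = (List.range xs.length).map (fun k => ((k + 1 : Nat) : Int)) := by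
      rw [PySem.List.pyRange_one]
      simp only [List.length_cons]
      rw [show ((((xs.length + 1 : Nat) : Int)) - 1).toNat = xs.length from by push_cast; omega]
      exact List.map_congr_left (fun k _ => by push_cast; ring)
    have e2 : ∀ k : Nat, (((k + 1 : Nat) : Int)) - 1 = ((k : Nat) : Int) := fun k => by
      push_cast; ring
    have h0 : PySem.List.pyGetD (x :: xs) (0 : Int) "" = x := by
      simp [PySem.List.pyGetD, PySem.List.pyIdx?, PySem.List.pyGet?]
    simp only [if_neg (by simp : ¬ (x :: xs = [])), hr, List.foldl_map, e2,
      PySem.List.pyGetD_natCast, h0]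
    rw [pv_fold xs x ['='] [x]]
    obtain ⟨hw, hd⟩ := pv_g_runs xs x
    simp only [List.singleton_append]
    rw [hw, hd]
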